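-- pv_equiv track=rewrite | github.com/oneal2000/Meta-PG | src/evaluation/wikimultihop.py | normalize_evi
-- ===== SOURCE A (Python) =====
-- import string
--
-- def normalize_evi(evidences):
--
--     def white_space_fix(text):
--         return ' '.join(text.split())
--
--     def remove_punc(text):
--         exclude = set(string.punctuation)
--         return ''.join(ch for ch in text if ch not in exclude)
--
--     def lower(text):
--         return text.lower()
--
--     def recurse(arr):
--         for i in range(len(arr)):
--             if isinstance(arr[i], str):
--                 arr[i] = white_space_fix(remove_punc(lower(arr[i])))
--             else:
--                 recurse(arr[i])
--
--     recurse(evidences)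
--
--     return evidences
-- ===== SOURCE B (Python) =====
-- import string
--
-- _DELETE = str.maketrans('', '', string.punctuation)
--
-- def normalize_evi(evidences):
--     # Returns freshly built lists (A mutates in place); return value is identical.
--     return [[' '.join(s.lower().translate(_DELETE).split()) for s in row]
--             for row in evidences]
-- ===== Notes on version B (the rewrite author's own statement) =====
-- stated objective: idiomatic
-- what changed: Replaces the recursive in-place index-assignment loop with a pure nested list comprehension, and deletes punctuation with a precomputed str.translate table instead of building a punctuation set and filtering characters in Python per call; B returns fresh lists instead of mutating the argument (return value identical).
import Mathlib
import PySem

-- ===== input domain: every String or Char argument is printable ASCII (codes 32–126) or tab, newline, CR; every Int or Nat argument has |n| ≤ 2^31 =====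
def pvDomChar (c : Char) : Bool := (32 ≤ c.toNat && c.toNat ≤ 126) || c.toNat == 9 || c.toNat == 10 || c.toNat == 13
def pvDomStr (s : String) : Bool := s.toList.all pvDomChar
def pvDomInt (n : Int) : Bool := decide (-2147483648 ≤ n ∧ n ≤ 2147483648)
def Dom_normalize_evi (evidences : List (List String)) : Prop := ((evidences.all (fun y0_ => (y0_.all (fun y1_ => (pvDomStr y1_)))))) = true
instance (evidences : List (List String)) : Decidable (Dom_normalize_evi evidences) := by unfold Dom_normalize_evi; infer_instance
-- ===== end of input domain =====

-- B replaces A's recursive in-place index-assignment loop by a pure nested map with a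
-- translate-style punctuation filter; A mutates its argument in place, B builds fresh
-- lists — the equivalence proved here is about the RETURN value only.

-- string.punctuation
def pvPunct : List Char := "!\"#$%&'()*+,-./:;<=>?@[\\]^_`{|}~".toList

-- ===== PORT A =====
-- white_space_fix(remove_punc(lower(text))): exclude = set(string.punctuation);
-- ''.join over the kept characters is ported as Chars.join [] of singleton lists.
def pvNormA (s : String) : String :=
  String.ofList (PySem.Chars.join [' '] (PySem.Chars.split₀
    (PySem.Chars.join []
      (((PySem.Str.lower s).toList.filter
          (fun ch => !(PySem.Set.contains (PySem.Set.ofList pvPunct) ch))).map (fun ch => [ch])))))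

-- recurse(arr) on an inner list: every element is a str, set arr[i] in place
def pvRecurseInner (arr : List String) : List String :=
  (PySem.List.pyRange 0 arr.length 1).foldl
    (fun acc i => PySem.List.pySetD acc i (pvNormA (PySem.List.pyGetD acc i ""))) arr

-- recurse(evidences): every element is a list, so recurse into it (assignment via the same slot)
def normalize_evi (evidences : List (List String)) : List (List String) :=
  (PySem.List.pyRange 0 evidences.length 1).foldl
    (fun acc i => PySem.List.pySetD acc i (pvRecurseInner (PySem.List.pyGetD acc i []))) evidences

-- ===== PORT B =====
-- s.lower().translate(_DELETE) deletes the punctuation characters (a filter), then split/join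
def pvNormB (s : String) : String :=
  String.ofList (PySem.Chars.join [' ']
    (PySem.Chars.split₀ ((PySem.Str.lower s).toList.filter (fun c => !pvPunct.contains c))))

def normalize_evi_alt (evidences : List (List String)) : List (List String) :=
  evidences.map (fun row => row.map pvNormB)

-- ===== PRECONDITION & SPEC =====
def Spec_normalize_evi (evidences : List (List String)) (out : List (List String)) : Prop := out = normalize_evi_alt evidences
instance (evidences : List (List String)) (out : List (List String)) : Decidable (Spec_normalize_evi evidences out) := by unfold Spec_normalize_evi; infer_instance

-- ===== CLAIM (what is proved, stated in full; the proofs are below) =====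
def Claim_equal_normalize_evi : Prop := ∀ (evidences : List (List String)), Dom_normalize_evi evidences → Spec_normalize_evi evidences (normalize_evi evidences)

-- ===== LEMMAS AND PROOFS =====

theorem pvNormA_eq_pvNormB (s : String) : pvNormA s = pvNormB s := by
  unfold pvNormA pvNormB
  rw [PySem.Chars.join_nil_singletons]
  have hset : (PySem.Set.ofList pvPunct : List Char) = pvPunct := by decide
  rw [hset]
  simp [PySem.Set.contains_eq_listContains]

-- A 'for i in range(len(xs)): xs[i] = f(xs[i])' loop is xs.map f (prefix-generalised)
theorem pvFoldl_set_map {α : Type} (f : α → α) (d : α) :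
    ∀ (xs pre : List α),
      (PySem.List.pyRange (pre.length : Int) ((pre.length : Int) + (xs.length : Int)) 1).foldl
        (fun acc i => PySem.List.pySetD acc i (f (PySem.List.pyGetD acc i d))) (pre ++ xs)
      = pre ++ xs.map f := by
  intro xs
  induction xs with
  | nil =>
      intro pre
      rw [PySem.List.pyRange_one_eq_nil (by simp)]
      simp
  | cons x xs ih =>
      intro pre
      rw [PySem.List.pyRange_one_cons (by simp)]
      simp only [List.foldl_cons]
      have hget : PySem.List.pyGetD (pre ++ x :: xs) (pre.length : Int) d = x := by
        rw [PySem.List.pyGetD_natCast]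
        simp [List.getD]
      have hset : PySem.List.pySetD (pre ++ x :: xs) (pre.length : Int) (f x)
          = (pre ++ [f x]) ++ xs := by
        rw [PySem.List.pySetD_natCast]
        rw [List.set_append_right _ _ (Nat.le_refl pre.length)]
        simp
      rw [hget, hset]
      have := ih (pre ++ [f x])
      have hlen : ((pre ++ [f x]).length : Int) = (pre.length : Int) + 1 := by
        simp
      rw [hlen] at this
      have harg : (pre.length : Int) + 1 + (xs.length : Int)
          = (pre.length : Int) + ((x :: xs).length : Int) := by
        simp; omega
      rw [harg] at this
      rw [this]
      simp

theorem pvFoldl_set_map_zero {α : Type} (f : α → α) (d : α) (xs : List α) :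
    (PySem.List.pyRange 0 (xs.length : Int) 1).foldl
        (fun acc i => PySem.List.pySetD acc i (f (PySem.List.pyGetD acc i d))) xs
      = xs.map f := by
  have := pvFoldl_set_map f d xs []
  simpa using this

theorem pvRecurseInner_eq (arr : List String) :
    pvRecurseInner arr = arr.map pvNormB := by
  unfold pvRecurseInner
  rw [pvFoldl_set_map_zero pvNormA "" arr]
  exact List.map_congr_left (fun s _ => pvNormA_eq_pvNormB s)

-- ===== VERDICT (by name: the statement is the Claim_ definition above) =====
theorem normalize_evi_spec : Claim_equal_normalize_evi := by
  intro evidences _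
  unfold Spec_normalize_evi normalize_evi normalize_evi_alt
  rw [pvFoldl_set_map_zero pvRecurseInner [] evidences]
  exact List.map_congr_left (fun row _ => pvRecurseInner_eq row)
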